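-- pv_equiv track=rewrite | github.com/Eight1911/neural-networks | game-2048/monte-carlo-tree-search/util.py | rcompress
-- ===== SOURCE A (Python) =====
-- def rcompress(row):
--     lo, hi = 3, 2
--     changed = False
--     while True:
--         while hi > -1 and not row[hi]: hi -= 1
--         if hi == -1: return changed
--         if not row[lo]:
--             row[lo] = row[hi]
--             row[hi] = 0
--             hi -= 1
--             changed = True
--         elif row[lo] == row[hi]:
--             row[hi] = 0
--             row[lo] += 1
--             hi -= 1
--             lo -= 1
--             changed = True
--         elif hi < lo - 1:
--             row[lo - 1] = row[hi]
--             row[hi] = 0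
--             hi -= 1
--             lo -= 1
--             changed = True
--         else:
--             hi -= 1
--             lo -= 1
-- ===== SOURCE B (Python) =====
-- def rcompress(row):
--     a, b, c, d = row[0:4]
--
--     def merge_rev(rv):
--         if len(rv) < 2:
--             return rv[:]
--         if rv[0] == rv[1]:
--             return [rv[0] + 1] + merge_rev(rv[2:])
--         return [rv[0]] + merge_rev(rv[1:])
--
--     vals = [x for x in (a, b, c, d) if x]
--     merged = merge_rev(vals[::-1])[::-1]
--     new = [0] * (4 - len(merged)) + merged
--     changed = new != [a, b, c, d]
--     row[0:4] = new
--     return changed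
-- ===== Notes on version B (the rewrite author's own statement) =====
-- stated objective: simpler
-- what changed: Replaces A's in-place two-pointer scan with mutable lo/hi indices and a changed flag by a functional pipeline: unpack the four cells, filter the non-zero tiles, merge equal neighbours once right-to-left, left-pad with zeros, and detect change by comparing old and new cells.
-- outside the precondition, e.g. on rcompress([0, 0, 0]): A returns False, B raises ValueError
import Mathlib
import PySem

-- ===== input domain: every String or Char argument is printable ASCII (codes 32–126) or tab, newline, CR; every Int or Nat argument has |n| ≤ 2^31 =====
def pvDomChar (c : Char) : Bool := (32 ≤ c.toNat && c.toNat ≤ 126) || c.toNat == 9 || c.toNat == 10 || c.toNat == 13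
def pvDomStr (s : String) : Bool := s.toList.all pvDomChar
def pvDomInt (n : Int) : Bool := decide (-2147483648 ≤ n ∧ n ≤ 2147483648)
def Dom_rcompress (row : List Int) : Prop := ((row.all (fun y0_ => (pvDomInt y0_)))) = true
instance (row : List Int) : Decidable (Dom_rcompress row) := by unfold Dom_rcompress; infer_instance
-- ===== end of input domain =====

-- B re-implements the rightward 2048 row merge by filtering the non-zero tiles of row[0:4]
-- and merging them once from the right, instead of A's two-pointer in-place scan; objective:
-- simpler. Both Pythons mutate `row` in place identically; the equivalence proved here is
-- about the RETURN value only.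

-- ===== PORT A =====
-- row[i] for 0 ≤ i < len (the only reads A performs inside Pre_); exact there via pyGet?
def pvGetA (row : List Int) (i : Int) : Int := (PySem.List.pyGet? row i).getD 0
-- row[i] = v for 0 ≤ i < len (the only writes A performs inside Pre_)
def pvSetA (row : List Int) (i : Int) (v : Int) : List Int := row.set i.toNat v

-- inner `while hi > -1 and not row[hi]: hi -= 1`
def pvSkipA (row : List Int) (hi : Int) : Int :=
  if h : hi > -1 ∧ pvGetA row hi = 0 then pvSkipA row (hi - 1) else hi
termination_by (hi + 1).toNat
decreasing_by omega

theorem pvSkipA_le (row : List Int) (hi : Int) : pvSkipA row hi ≤ hi := by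
  fun_induction pvSkipA row hi with
  | case1 hi h ih => omega
  | case2 hi h => omega

-- outer `while True` loop of A, state (row, lo, hi, changed)
-- exit guard `hi' ≤ -1`: in every state the loop reaches, pvSkipA returns ≥ -1, so this is
-- Python's `hi == -1` test; `≤` only makes the recursion well-founded from unreachable states.
def pvLoopA (row : List Int) (lo hi : Int) (changed : Bool) : Bool :=
  let hi' := pvSkipA row hi
  if hi' ≤ -1 then changed
  else if pvGetA row lo = 0 then
    pvLoopA (pvSetA (pvSetA row lo (pvGetA row hi')) hi' 0) lo (hi' - 1) true
  else if pvGetA row lo = pvGetA row hi' then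
    let r1 := pvSetA row hi' 0
    pvLoopA (pvSetA r1 lo (pvGetA r1 lo + 1)) (lo - 1) (hi' - 1) true
  else if hi' < lo - 1 then
    pvLoopA (pvSetA (pvSetA row (lo - 1) (pvGetA row hi')) hi' 0) (lo - 1) (hi' - 1) true
  else
    pvLoopA row (lo - 1) (hi' - 1) changed
termination_by (hi + 2).toNat
decreasing_by
  all_goals (have := pvSkipA_le row hi; omega)

def rcompress (row : List Int) : Bool := pvLoopA row 3 2 false

-- ===== PORT B =====
-- merge_rev of Source B: merge-once over the reversed non-zero tiles
def pvMergeRev : List Int → List Int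
  | [] => []
  | [x] => [x]
  | x :: y :: rest => if x = y then (x + 1) :: pvMergeRev rest else x :: pvMergeRev (y :: rest)

-- `a, b, c, d = row[0:4]`: the match arm `_` is the ValueError of a short row (outside Pre_)
def rcompress_alt (row : List Int) : Bool :=
  match PySem.List.slice row (some 0) (some 4) with
  | [a, b, c, d] =>
    let vals := [a, b, c, d].filter (fun x => x ≠ 0)
    let merged := (pvMergeRev vals.reverse).reverse
    let new := List.replicate (4 - merged.length) 0 ++ merged
    decide (new ≠ [a, b, c, d])
  | _ => false

-- ===== PRECONDITION & SPEC =====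
-- Pre_ excludes rows shorter than four cells, which are outside the 2048 row's 4-cell shape:
-- A raises IndexError on every one of them except the all-zero length-3 row (where its scan
-- happens to return False), and B, which unpacks the four cells, raises ValueError on all of them.
def Pre_rcompress (row : List Int) : Prop := 4 ≤ row.length
instance (row : List Int) : Decidable (Pre_rcompress row) := by unfold Pre_rcompress; infer_instance
def pvWitness_rcompress : List Int := [1, 0, 1, 2]

def Spec_rcompress (row : List Int) (out : Bool) : Prop := out = rcompress_alt row
instance (row : List Int) (out : Bool) : Decidable (Spec_rcompress row out) := by unfold Spec_rcompress; infer_instance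

-- ===== CLAIM =====
def Claim_equal_rcompress : Prop := ∀ (row : List Int), Dom_rcompress row → Pre_rcompress row → Spec_rcompress row (rcompress row)

-- ===== LEMMAS AND PROOFS =====

theorem getA0 (x : Int) (l : List Int) : pvGetA (x :: l) 0 = x := by
  simp [pvGetA, PySem.List.pyGet?, PySem.List.pyIdx?]
theorem getA1 (x y : Int) (l : List Int) : pvGetA (x :: y :: l) 1 = y := by
  simp [pvGetA, PySem.List.pyGet?, PySem.List.pyIdx?]
theorem getA2 (x y z : Int) (l : List Int) : pvGetA (x :: y :: z :: l) 2 = z := by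
  have h : (2:Int) ≤ (l.length:Int) + 1 + 1 := by omega
  simp [pvGetA, PySem.List.pyGet?, PySem.List.pyIdx?, h]
theorem getA3 (x y z w : Int) (l : List Int) : pvGetA (x :: y :: z :: w :: l) 3 = w := by
  have h : (3:Int) ≤ (l.length:Int) + 1 + 1 + 1 := by omega
  simp [pvGetA, PySem.List.pyGet?, PySem.List.pyIdx?, h]
theorem setA0 (x : Int) (l : List Int) (v : Int) : pvSetA (x :: l) 0 v = v :: l := by
  simp [pvSetA]
theorem setA1 (x y : Int) (l : List Int) (v : Int) : pvSetA (x :: y :: l) 1 v = x :: v :: l := by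
  simp [pvSetA]
theorem setA2 (x y z : Int) (l : List Int) (v : Int) : pvSetA (x :: y :: z :: l) 2 v = x :: y :: v :: l := by
  simp [pvSetA]
theorem setA3 (x y z w : Int) (l : List Int) (v : Int) : pvSetA (x :: y :: z :: w :: l) 3 v = x :: y :: z :: v :: l := by
  simp [pvSetA]

-- A = B on any row with at least four cells: case analysis on which of the first four
-- cells are zero and on equality of the tiles each side actually compares; both sides
-- are then evaluated symbolically by rewriting.
set_option maxHeartbeats 4000000 in
theorem rcompress_four (a b c d : Int) (t : List Int) :
    rcompress (a :: b :: c :: d :: t) = rcompress_alt (a :: b :: c :: d :: t) := by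
  by_cases ha : a = 0
  · by_cases hb : b = 0
    · by_cases hc : c = 0
      · by_cases hd : d = 0
        · simp [rcompress, rcompress_alt, pvLoopA.eq_def, pvSkipA.eq_def, getA0, getA1, getA2, getA3, setA0, setA1, setA2, setA3, PySem.List.slice, pvMergeRev, ha, hb, hc, hd] <;> omega
        · simp [rcompress, rcompress_alt, pvLoopA.eq_def, pvSkipA.eq_def, getA0, getA1, getA2, getA3, setA0, setA1, setA2, setA3, PySem.List.slice, pvMergeRev, ha, hb, hc, hd] <;> omega
      · by_cases hd : d = 0
        · simp [rcompress, rcompress_alt, pvLoopA.eq_def, pvSkipA.eq_def, getA0, getA1, getA2, getA3, setA0, setA1, setA2, setA3, PySem.List.slice, pvMergeRev, ha, hb, hc, hd] <;> omega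
        · by_cases e1 : d = c
          · simp [rcompress, rcompress_alt, pvLoopA.eq_def, pvSkipA.eq_def, getA0, getA1, getA2, getA3, setA0, setA1, setA2, setA3, PySem.List.slice, pvMergeRev, ha, hb, hc, hd, e1] <;> omega
          · simp [rcompress, rcompress_alt, pvLoopA.eq_def, pvSkipA.eq_def, getA0, getA1, getA2, getA3, setA0, setA1, setA2, setA3, PySem.List.slice, pvMergeRev, ha, hb, hc, hd, e1] <;> omega
    · by_cases hc : c = 0
      · by_cases hd : d = 0
        · simp [rcompress, rcompress_alt, pvLoopA.eq_def, pvSkipA.eq_def, getA0, getA1, getA2, getA3, setA0, setA1, setA2, setA3, PySem.List.slice, pvMergeRev, ha, hb, hc, hd] <;> omega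
        · by_cases e1 : d = b
          · simp [rcompress, rcompress_alt, pvLoopA.eq_def, pvSkipA.eq_def, getA0, getA1, getA2, getA3, setA0, setA1, setA2, setA3, PySem.List.slice, pvMergeRev, ha, hb, hc, hd, e1] <;> omega
          · simp [rcompress, rcompress_alt, pvLoopA.eq_def, pvSkipA.eq_def, getA0, getA1, getA2, getA3, setA0, setA1, setA2, setA3, PySem.List.slice, pvMergeRev, ha, hb, hc, hd, e1] <;> omega
      · by_cases hd : d = 0
        · by_cases e1 : c = b
          · simp [rcompress, rcompress_alt, pvLoopA.eq_def, pvSkipA.eq_def, getA0, getA1, getA2, getA3, setA0, setA1, setA2, setA3, PySem.List.slice, pvMergeRev, ha, hb, hc, hd, e1] <;> omega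
          · simp [rcompress, rcompress_alt, pvLoopA.eq_def, pvSkipA.eq_def, getA0, getA1, getA2, getA3, setA0, setA1, setA2, setA3, PySem.List.slice, pvMergeRev, ha, hb, hc, hd, e1] <;> omega
        · by_cases e1 : d = c
          · by_cases e2 : c = b
            · simp [rcompress, rcompress_alt, pvLoopA.eq_def, pvSkipA.eq_def, getA0, getA1, getA2, getA3, setA0, setA1, setA2, setA3, PySem.List.slice, pvMergeRev, ha, hb, hc, hd, e1, e2] <;> omega
            · simp [rcompress, rcompress_alt, pvLoopA.eq_def, pvSkipA.eq_def, getA0, getA1, getA2, getA3, setA0, setA1, setA2, setA3, PySem.List.slice, pvMergeRev, ha, hb, hc, hd, e1, e2] <;> omega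
          · by_cases e2 : c = b
            · simp [rcompress, rcompress_alt, pvLoopA.eq_def, pvSkipA.eq_def, getA0, getA1, getA2, getA3, setA0, setA1, setA2, setA3, PySem.List.slice, pvMergeRev, ha, hb, hc, hd, e1, e2] <;> (first | omega | (split_ifs <;> simp_all <;> omega) | (split_ifs <;> simp_all))
            · simp [rcompress, rcompress_alt, pvLoopA.eq_def, pvSkipA.eq_def, getA0, getA1, getA2, getA3, setA0, setA1, setA2, setA3, PySem.List.slice, pvMergeRev, ha, hb, hc, hd, e1, e2] <;> omega
  · by_cases hb : b = 0
    · by_cases hc : c = 0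
      · by_cases hd : d = 0
        · simp [rcompress, rcompress_alt, pvLoopA.eq_def, pvSkipA.eq_def, getA0, getA1, getA2, getA3, setA0, setA1, setA2, setA3, PySem.List.slice, pvMergeRev, ha, hb, hc, hd] <;> omega
        · by_cases e1 : d = a
          · simp [rcompress, rcompress_alt, pvLoopA.eq_def, pvSkipA.eq_def, getA0, getA1, getA2, getA3, setA0, setA1, setA2, setA3, PySem.List.slice, pvMergeRev, ha, hb, hc, hd, e1] <;> omega
          · simp [rcompress, rcompress_alt, pvLoopA.eq_def, pvSkipA.eq_def, getA0, getA1, getA2, getA3, setA0, setA1, setA2, setA3, PySem.List.slice, pvMergeRev, ha, hb, hc, hd, e1] <;> omega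
      · by_cases hd : d = 0
        · by_cases e1 : c = a
          · simp [rcompress, rcompress_alt, pvLoopA.eq_def, pvSkipA.eq_def, getA0, getA1, getA2, getA3, setA0, setA1, setA2, setA3, PySem.List.slice, pvMergeRev, ha, hb, hc, hd, e1] <;> omega
          · simp [rcompress, rcompress_alt, pvLoopA.eq_def, pvSkipA.eq_def, getA0, getA1, getA2, getA3, setA0, setA1, setA2, setA3, PySem.List.slice, pvMergeRev, ha, hb, hc, hd, e1] <;> omega
        · by_cases e1 : d = c
          · by_cases e2 : c = a
            · simp [rcompress, rcompress_alt, pvLoopA.eq_def, pvSkipA.eq_def, getA0, getA1, getA2, getA3, setA0, setA1, setA2, setA3, PySem.List.slice, pvMergeRev, ha, hb, hc, hd, e1, e2] <;> omega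
            · simp [rcompress, rcompress_alt, pvLoopA.eq_def, pvSkipA.eq_def, getA0, getA1, getA2, getA3, setA0, setA1, setA2, setA3, PySem.List.slice, pvMergeRev, ha, hb, hc, hd, e1, e2] <;> omega
          · by_cases e2 : c = a
            · simp [rcompress, rcompress_alt, pvLoopA.eq_def, pvSkipA.eq_def, getA0, getA1, getA2, getA3, setA0, setA1, setA2, setA3, PySem.List.slice, pvMergeRev, ha, hb, hc, hd, e1, e2] <;> (first | omega | (split_ifs <;> simp_all <;> omega) | (split_ifs <;> simp_all))
            · simp [rcompress, rcompress_alt, pvLoopA.eq_def, pvSkipA.eq_def, getA0, getA1, getA2, getA3, setA0, setA1, setA2, setA3, PySem.List.slice, pvMergeRev, ha, hb, hc, hd, e1, e2] <;> omega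
    · by_cases hc : c = 0
      · by_cases hd : d = 0
        · by_cases e1 : b = a
          · simp [rcompress, rcompress_alt, pvLoopA.eq_def, pvSkipA.eq_def, getA0, getA1, getA2, getA3, setA0, setA1, setA2, setA3, PySem.List.slice, pvMergeRev, ha, hb, hc, hd, e1] <;> omega
          · simp [rcompress, rcompress_alt, pvLoopA.eq_def, pvSkipA.eq_def, getA0, getA1, getA2, getA3, setA0, setA1, setA2, setA3, PySem.List.slice, pvMergeRev, ha, hb, hc, hd, e1] <;> omega
        · by_cases e1 : d = b
          · by_cases e2 : b = a
            · simp [rcompress, rcompress_alt, pvLoopA.eq_def, pvSkipA.eq_def, getA0, getA1, getA2, getA3, setA0, setA1, setA2, setA3, PySem.List.slice, pvMergeRev, ha, hb, hc, hd, e1, e2] <;> omega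
            · simp [rcompress, rcompress_alt, pvLoopA.eq_def, pvSkipA.eq_def, getA0, getA1, getA2, getA3, setA0, setA1, setA2, setA3, PySem.List.slice, pvMergeRev, ha, hb, hc, hd, e1, e2] <;> omega
          · by_cases e2 : b = a
            · simp [rcompress, rcompress_alt, pvLoopA.eq_def, pvSkipA.eq_def, getA0, getA1, getA2, getA3, setA0, setA1, setA2, setA3, PySem.List.slice, pvMergeRev, ha, hb, hc, hd, e1, e2] <;> (first | omega | (split_ifs <;> simp_all <;> omega) | (split_ifs <;> simp_all))
            · simp [rcompress, rcompress_alt, pvLoopA.eq_def, pvSkipA.eq_def, getA0, getA1, getA2, getA3, setA0, setA1, setA2, setA3, PySem.List.slice, pvMergeRev, ha, hb, hc, hd, e1, e2] <;> omega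
      · by_cases hd : d = 0
        · by_cases e1 : c = b
          · by_cases e2 : b = a
            · simp [rcompress, rcompress_alt, pvLoopA.eq_def, pvSkipA.eq_def, getA0, getA1, getA2, getA3, setA0, setA1, setA2, setA3, PySem.List.slice, pvMergeRev, ha, hb, hc, hd, e1, e2] <;> omega
            · simp [rcompress, rcompress_alt, pvLoopA.eq_def, pvSkipA.eq_def, getA0, getA1, getA2, getA3, setA0, setA1, setA2, setA3, PySem.List.slice, pvMergeRev, ha, hb, hc, hd, e1, e2] <;> omega
          · by_cases e2 : b = a
            · simp [rcompress, rcompress_alt, pvLoopA.eq_def, pvSkipA.eq_def, getA0, getA1, getA2, getA3, setA0, setA1, setA2, setA3, PySem.List.slice, pvMergeRev, ha, hb, hc, hd, e1, e2] <;> (first | omega | (split_ifs <;> simp_all <;> omega) | (split_ifs <;> simp_all))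
            · simp [rcompress, rcompress_alt, pvLoopA.eq_def, pvSkipA.eq_def, getA0, getA1, getA2, getA3, setA0, setA1, setA2, setA3, PySem.List.slice, pvMergeRev, ha, hb, hc, hd, e1, e2] <;> omega
        · by_cases e1 : d = c
          · by_cases e2 : c = b
            · by_cases e3 : b = a
              · simp [rcompress, rcompress_alt, pvLoopA.eq_def, pvSkipA.eq_def, getA0, getA1, getA2, getA3, setA0, setA1, setA2, setA3, PySem.List.slice, pvMergeRev, ha, hb, hc, hd, e1, e2, e3] <;> omega
              · simp [rcompress, rcompress_alt, pvLoopA.eq_def, pvSkipA.eq_def, getA0, getA1, getA2, getA3, setA0, setA1, setA2, setA3, PySem.List.slice, pvMergeRev, ha, hb, hc, hd, e1, e2, e3] <;> omega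
            · by_cases e3 : b = a
              · simp [rcompress, rcompress_alt, pvLoopA.eq_def, pvSkipA.eq_def, getA0, getA1, getA2, getA3, setA0, setA1, setA2, setA3, PySem.List.slice, pvMergeRev, ha, hb, hc, hd, e1, e2, e3] <;> omega
              · simp [rcompress, rcompress_alt, pvLoopA.eq_def, pvSkipA.eq_def, getA0, getA1, getA2, getA3, setA0, setA1, setA2, setA3, PySem.List.slice, pvMergeRev, ha, hb, hc, hd, e1, e2, e3] <;> omega
          · by_cases e2 : c = b
            · by_cases e3 : b = a
              · simp [rcompress, rcompress_alt, pvLoopA.eq_def, pvSkipA.eq_def, getA0, getA1, getA2, getA3, setA0, setA1, setA2, setA3, PySem.List.slice, pvMergeRev, ha, hb, hc, hd, e1, e2, e3] <;> (first | omega | (split_ifs <;> simp_all <;> omega) | (split_ifs <;> simp_all))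
              · simp [rcompress, rcompress_alt, pvLoopA.eq_def, pvSkipA.eq_def, getA0, getA1, getA2, getA3, setA0, setA1, setA2, setA3, PySem.List.slice, pvMergeRev, ha, hb, hc, hd, e1, e2, e3] <;> (first | omega | (split_ifs <;> simp_all <;> omega) | (split_ifs <;> simp_all))
            · by_cases e3 : b = a
              · simp [rcompress, rcompress_alt, pvLoopA.eq_def, pvSkipA.eq_def, getA0, getA1, getA2, getA3, setA0, setA1, setA2, setA3, PySem.List.slice, pvMergeRev, ha, hb, hc, hd, e1, e2, e3] <;> (first | omega | (split_ifs <;> simp_all <;> omega) | (split_ifs <;> simp_all))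
              · simp [rcompress, rcompress_alt, pvLoopA.eq_def, pvSkipA.eq_def, getA0, getA1, getA2, getA3, setA0, setA1, setA2, setA3, PySem.List.slice, pvMergeRev, ha, hb, hc, hd, e1, e2, e3] <;> omega


-- ===== VERDICT =====
theorem rcompress_spec : Claim_equal_rcompress := by
  intro row _ hpre
  unfold Spec_rcompress
  match row, hpre with
  | a :: b :: c :: d :: t, _ => exact rcompress_four a b c d t
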